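-- pv_equiv track=rewrite | github.com/ShuZ3274/Jupiter-Convection | profile_class.py | find_highest_peak
-- ===== SOURCE A (Python) =====
-- def find_highest_peak(array):
--     n = len(array)
--     highest_peak_index = 0
--     highest_peak_value = float('-inf')
--
--     for i in range(n):
--         # Check if it's a peak
--         if (i == 0 or array[i] >= array[i-1]) and (i == n-1 or array[i] >= array[i+1]):
--             # Update highest peak if current is larger
--             if array[i] > highest_peak_value:
--                 highest_peak_value = array[i]
--                 highest_peak_index = i
--
--     return highest_peak_index, highest_peak_value
-- ===== SOURCE B (Python) =====
-- def find_highest_peak(array):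
--     # The global maximum is always a local peak, and its first occurrence is
--     # the first peak attaining the maximal value, so A's scan reduces to this.
--     m = max(array)
--     return array.index(m), m
-- ===== Notes on version B (the rewrite author's own statement) =====
-- stated objective: simpler
-- what changed: Replaces the index loop with explicit neighbour comparisons and a running best-peak state by the closed form max(array) + array.index: the global maximum is always a local peak and its first occurrence is the first peak of maximal value.
-- outside the precondition, e.g. on find_highest_peak([]): A returns (0, -inf), B raises ValueError
import Mathlib
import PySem

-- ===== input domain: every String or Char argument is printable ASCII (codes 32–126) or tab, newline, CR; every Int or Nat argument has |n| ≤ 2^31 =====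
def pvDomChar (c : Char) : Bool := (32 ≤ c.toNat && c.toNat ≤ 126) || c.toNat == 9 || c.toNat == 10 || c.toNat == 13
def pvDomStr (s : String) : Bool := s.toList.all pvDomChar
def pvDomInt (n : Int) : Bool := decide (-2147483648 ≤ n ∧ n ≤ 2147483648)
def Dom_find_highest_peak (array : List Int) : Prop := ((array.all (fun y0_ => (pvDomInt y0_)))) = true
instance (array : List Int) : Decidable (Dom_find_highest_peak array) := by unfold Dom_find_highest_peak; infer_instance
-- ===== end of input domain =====

-- B replaces A's peak-scanning loop by max + first index; return-value equivalence on nonempty lists.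

-- ===== PORT A =====
-- loop body of A: peak test with short-circuit neighbour guards, then strict best update
def pvStepA (array : List Int) (n : Int) (s : Int × Option Int) (i : Int) : Int × Option Int :=
  if (i = 0 ∨ PySem.List.pyGetD array (i-1) 0 ≤ PySem.List.pyGetD array i 0) ∧
     (i = n - 1 ∨ PySem.List.pyGetD array (i+1) 0 ≤ PySem.List.pyGetD array i 0) then
    match s.2 with
    | none => (i, some (PySem.List.pyGetD array i 0))   -- array[i] > -inf always
    | some v => if v < PySem.List.pyGetD array i 0 then (i, some (PySem.List.pyGetD array i 0)) else s
  else s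

def find_highest_peak (array : List Int) : Int × Int :=
  let n : Int := array.length
  let st := (PySem.List.pyRange 0 n 1).foldl (pvStepA array n) (0, none)
  -- highest_peak_value stays float('-inf') only on the empty array, which Pre_ excludes
  (st.1, st.2.getD 0)

-- ===== PORT B =====
def find_highest_peak_alt (array : List Int) : Int × Int :=
  match PySem.List.max? array (fun x => x) with
  | none => (0, 0)   -- unreachable under Pre_: Python's max raises ValueError on []
  | some m => (((PySem.List.index? array m).getD 0 : Nat), m)

-- ===== PRECONDITION & SPEC =====
-- Pre_ excludes the empty list, on which A returns (0, float('-inf')) — a float, not a value of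
-- the declared int type — and B's max() raises ValueError.
def Pre_find_highest_peak (array : List Int) : Prop := array ≠ []
instance (array : List Int) : Decidable (Pre_find_highest_peak array) := by unfold Pre_find_highest_peak; infer_instance
def pvWitness_find_highest_peak : List Int := [1, 3, 2]

def Spec_find_highest_peak (array : List Int) (out : Int × Int) : Prop := out = find_highest_peak_alt array
instance (array : List Int) (out : Int × Int) : Decidable (Spec_find_highest_peak array out) := by unfold Spec_find_highest_peak; infer_instance

-- ===== CLAIM (what is proved, stated in full; the proofs are below) =====
def Claim_equal_find_highest_peak : Prop := ∀ (array : List Int), Dom_find_highest_peak array → Pre_find_highest_peak array → Spec_find_highest_peak array (find_highest_peak array)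

-- ===== LEMMAS AND PROOFS =====

-- state after processing indices [0, k)
def pvF (array : List Int) (k : Nat) : Int × Option Int :=
  (List.range k).foldl (fun (s : Int × Option Int) (i : Nat) => pvStepA array (array.length : Int) s ((i : Nat) : Int)) ((0 : Int), (none : Option Int))

lemma pvF_succ (array : List Int) (k : Nat) :
    pvF array (k+1) = pvStepA array (array.length : Int) (pvF array k) (k : Int) := by
  simp [pvF, List.range_succ]

lemma pvGetD_nat (array : List Int) (k : Nat) (hk : k < array.length) :
    PySem.List.pyGetD array (k : Int) 0 = array[k] := by
  simp [PySem.List.pyGetD_natCast, List.getD, List.getElem?_eq_getElem hk]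

lemma pvF_low (array : List Int) (j M : Int)
    (hmax : ∀ y ∈ array, y ≤ M)
    (hfirst : ∀ (k : Nat) (hk : k < array.length), (k : Int) < j → array[k] ≠ M) :
    ∀ k : Nat, (k : Int) ≤ j → k ≤ array.length →
      ∀ v, (pvF array k).2 = some v → v < M := by
  intro k
  induction k with
  | zero => intro _ _ v hv; simp [pvF] at hv
  | succ k ih =>
    intro hkj hkl v hv
    rw [pvF_succ] at hv
    have hk1 : (k : Int) < j := by push_cast at hkj ⊢; omega
    have hkl' : k < array.length := by omega
    have hne : array[k] ≠ M := hfirst k hkl' hk1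
    have hle : array[k] ≤ M := hmax _ (array.getElem_mem hkl')
    have harr : PySem.List.pyGetD array (k : Int) 0 = array[k] := pvGetD_nat array k hkl'
    rcases hF : pvF array k with ⟨idx, val⟩
    rw [hF] at hv
    unfold pvStepA at hv
    split_ifs at hv with hc
    · rcases val with _ | w
      · simp [harr] at hv; omega
      · simp only at hv
        split_ifs at hv with hlt
        · simp [harr] at hv; omega
        · simp only at hv
          exact ih (by omega) (by omega) v (by rw [hF]; exact hv)
    · exact ih (by omega) (by omega) v (by rw [hF]; exact hv)

lemma pvF_high (array : List Int) (j : Nat) (M : Int)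
    (hj : j < array.length) (hMj : array[j] = M)
    (hmax : ∀ y ∈ array, y ≤ M)
    (hfirst : ∀ (k : Nat) (hk : k < array.length), (k : Int) < (j : Int) → array[k] ≠ M) :
    ∀ k : Nat, j < k → k ≤ array.length → pvF array k = ((j : Int), some M) := by
  intro k
  induction k with
  | zero => intro h _; omega
  | succ k ih =>
    intro hjk hkl
    rw [pvF_succ]
    have hkl' : k < array.length := by omega
    have harr : PySem.List.pyGetD array (k : Int) 0 = array[k] := pvGetD_nat array k hkl'
    rcases Nat.lt_or_ge j k with hlt | hge
    · -- k > j: state is already (j, some M) and array[k] ≤ M blocks any update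
      rw [ih hlt (by omega)]
      have hle : array[k] ≤ M := hmax _ (array.getElem_mem hkl')
      unfold pvStepA
      split_ifs with hc
      · simp only
        rw [if_neg (by rw [harr]; omega)]
      · rfl
    · -- k = j: the first occurrence of the maximum is a peak and strictly beats the state
      have hkj : k = j := by omega
      subst hkj
      have hL : ((k : Int) = 0 ∨ PySem.List.pyGetD array ((k : Int) - 1) 0 ≤ PySem.List.pyGetD array (k : Int) 0) := by
        rcases Nat.eq_zero_or_pos k with h0 | h0
        · left; simp [h0]
        · right
          have hcast : ((k : Int) - 1) = ((k - 1 : Nat) : Int) := by omega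
          have hk1 : k - 1 < array.length := by omega
          rw [hcast, pvGetD_nat array (k-1) hk1, harr, hMj]
          exact hmax _ (array.getElem_mem hk1)
      have hR : ((k : Int) = (array.length : Int) - 1 ∨ PySem.List.pyGetD array ((k : Int) + 1) 0 ≤ PySem.List.pyGetD array (k : Int) 0) := by
        rcases Nat.lt_or_ge (k + 1) array.length with h1 | h1
        · right
          have hcast : ((k : Int) + 1) = ((k + 1 : Nat) : Int) := by omega
          rw [hcast, pvGetD_nat array (k+1) h1, harr, hMj]
          exact hmax _ (array.getElem_mem h1)
        · left; omega
      unfold pvStepA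
      rw [if_pos ⟨hL, hR⟩]
      rcases hF : pvF array k with ⟨idx, val⟩
      rcases val with _ | w
      · simp [harr, hMj]
      · have hw : w < M := pvF_low array k M hmax hfirst k (le_refl _) (by omega) w (by rw [hF])
        simp only
        rw [if_pos (by rw [harr, hMj]; omega)]
        simp [harr, hMj]

-- ===== VERDICT (by name: the statement is the Claim_ definition above) =====
theorem find_highest_peak_spec : Claim_equal_find_highest_peak := by
  intro array _ hpre
  unfold Spec_find_highest_peak
  cases array with
  | nil => exact absurd rfl hpre
  | cons x t =>
    have hmaxd : PySem.List.max? (x :: t) (fun y => y) = some (t.foldl max x) :=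
      PySem.List.max?_id_cons x t
    set M := t.foldl max x with hM
    have hmax : ∀ y ∈ x :: t, y ≤ M := PySem.List.max?_isMax hmaxd
    have hmem : M ∈ x :: t := PySem.List.max?_mem hmaxd
    obtain ⟨j, hidx⟩ :=
      Option.isSome_iff_exists.mp ((PySem.List.index?_isSome_iff (x :: t) M).mpr hmem)
    obtain ⟨hj, hMj, hbefore⟩ := PySem.List.getElem_of_index?_eq_some hidx
    have hfirst : ∀ (k : Nat) (hk : k < (x :: t).length), (k : Int) < (j : Int) → (x :: t)[k] ≠ M := by
      intro k hk hkj
      exact hbefore k (by omega)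
    have hres_alt : find_highest_peak_alt (x :: t) = ((j : Int), M) := by
      simp only [find_highest_peak_alt, hmaxd]
      rw [hidx]
      rfl
    have hA : pvF (x :: t) (x :: t).length = ((j : Int), some M) :=
      pvF_high (x :: t) j M hj hMj hmax hfirst (x :: t).length (by omega) (le_refl _)
    have hrange : PySem.List.pyRange 0 ((x :: t).length : Int) 1
        = (List.range (x :: t).length).map (fun k => ((k : Nat) : Int)) := by
      rw [PySem.List.pyRange_one]
      simp
    have hres_A : find_highest_peak (x :: t) = ((j : Int), M) := by
      simp only [find_highest_peak]
      rw [hrange, List.foldl_map]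
      have hfold : ((List.range (x :: t).length).foldl
          (fun s (k : Nat) => pvStepA (x :: t) ((x :: t).length : Int) s ((k : Nat) : Int))
          ((0 : Int), (none : Option Int))) = pvF (x :: t) (x :: t).length := by
        unfold pvF
        rfl
      rw [hfold, hA]
      rfl
    rw [hres_A, hres_alt]
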